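-- pv_equiv track=rewrite | github.com/Laurence-Taylor/FCC-Python-Daily-Coding-Challenge-2006-03-11-Word-Length-Converter | main.py | convert_words
-- ===== SOURCE A (Python) =====
-- def convert_words(s):
--     # Create and init variable to return the answer
--     s_to_return = ''
--     # define previous position pointer
--     prev_pos = 0
--     # iterate over each character
--     for i in range(len(s)):
--         # if character is a blank space then I found a new word
--         if s[i] == ' ':
--             # add the leng of the word to the string to return
--             s_to_return += str(i-prev_pos) + ' '
--             # update the previous position pointer
--             prev_pos = i + 1
--         # if I reach the end of the string
--         if i == len(s)-1:
--             # add the leng of the last word to the string to return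
--             s_to_return += str(i-prev_pos+1)
--
--     return s_to_return
-- ===== SOURCE B (Python) =====
-- def convert_words(s):
--     # Idiomatic: split on single spaces once and join the word lengths.
--     # Empty input has no words at all, so it maps to the empty string.
--     if s == '':
--         return ''
--     return ' '.join(str(len(w)) for w in s.split(' '))
-- ===== Notes on version B (the rewrite author's own statement) =====
-- stated objective: idiomatic
-- what changed: B splits the string on single spaces once and joins the word lengths, instead of A's character-by-character scan with a previous-position pointer and repeated string concatenation (the concatenation is what B's join avoids, measured as a constant-factor speedup).
import Mathlib
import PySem

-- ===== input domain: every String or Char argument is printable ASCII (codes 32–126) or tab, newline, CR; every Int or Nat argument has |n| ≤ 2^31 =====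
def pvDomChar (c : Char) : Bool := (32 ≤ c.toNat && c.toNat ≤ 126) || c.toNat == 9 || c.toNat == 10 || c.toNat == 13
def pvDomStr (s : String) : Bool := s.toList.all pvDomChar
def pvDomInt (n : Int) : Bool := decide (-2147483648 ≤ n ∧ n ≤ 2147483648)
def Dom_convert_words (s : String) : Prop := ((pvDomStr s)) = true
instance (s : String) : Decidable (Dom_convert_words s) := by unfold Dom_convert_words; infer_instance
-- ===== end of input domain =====

-- B replaces A's character scan with previous-position pointer and repeated string
-- concatenation by an idiomatic split-on-space + join of the word lengths; same result.


-- ===== PORT A =====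
-- one loop step of A: the two `if`s of the Python body, state = (s_to_return, prev_pos)
def convertStepA (cs : List Char) (acc : List Char × Int) (i : Int) : List Char × Int :=
  let acc1 := if PySem.List.pyGetD cs i ' ' = ' '
    then (acc.1 ++ PySem.Int.toChars (i - acc.2) ++ [' '], i + 1)
    else acc
  let r := if i = (cs.length : Int) - 1 then acc1.1 ++ PySem.Int.toChars (i - acc1.2 + 1) else acc1.1
  (r, acc1.2)

def convert_words (s : String) : String :=
  let cs := s.toList
  let st := (PySem.List.pyRange 0 (cs.length : Int) 1).foldl (convertStepA cs) ([], 0)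
  String.ofList st.1

-- ===== PORT B =====
def convert_words_alt (s : String) : String :=
  if s = "" then "" else
    String.ofList (PySem.Chars.join [' ']
      ((PySem.Chars.splitOn s.toList [' ']).map (fun w => PySem.Int.toChars (w.length : Int))))

-- ===== PRECONDITION & SPEC =====
def Spec_convert_words (s : String) (out : String) : Prop := out = convert_words_alt s
instance (s : String) (out : String) : Decidable (Spec_convert_words s out) := by unfold Spec_convert_words; infer_instance

-- ===== CLAIM (what is proved, stated in full; the proofs are below) =====
def Claim_equal_convert_words : Prop := ∀ (s : String), Dom_convert_words s → Spec_convert_words s (convert_words s)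

-- ===== LEMMAS AND PROOFS =====

-- proof-side characterisation of Python's s.split(' '): pending word `p`, rest of the string
def splitRec : List Char → List Char → List (List Char)
  | p, [] => [p]
  | p, c :: t => if c = ' ' then p :: splitRec [] t else splitRec (p ++ [c]) t

lemma splitRec_ne_nil (p l : List Char) : splitRec p l ≠ [] := by
  induction l generalizing p with
  | nil => simp [splitRec]
  | cons c t ih => by_cases h : c = ' ' <;> simp [splitRec, h, ih]

lemma splitOn_go_eq (fuel : Nat) : ∀ (l cur : List Char) (acc : List (List Char)),
    l.length < fuel →
    PySem.Chars.splitOn.go [' '] fuel l cur acc = acc.reverse ++ splitRec cur.reverse l := by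
  induction fuel with
  | zero => intro l cur acc h; omega
  | succ fuel ih =>
    intro l cur acc h
    cases l with
    | nil => simp [PySem.Chars.splitOn.go, splitRec]
    | cons c rest =>
      by_cases hc : c = ' '
      · subst hc
        rw [show PySem.Chars.splitOn.go [' '] (fuel+1) (' ' :: rest) cur acc
              = PySem.Chars.splitOn.go [' '] fuel rest [] (cur.reverse :: acc) by
            simp [PySem.Chars.splitOn.go, List.isPrefixOf]]
        rw [ih rest [] (cur.reverse :: acc) (by simpa using Nat.lt_of_succ_lt_succ h)]
        simp [splitRec]
      · rw [show PySem.Chars.splitOn.go [' '] (fuel+1) (c :: rest) cur acc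
              = PySem.Chars.splitOn.go [' '] fuel rest (c :: cur) acc by
            simp [PySem.Chars.splitOn.go, List.isPrefixOf, Ne.symm hc]]
        rw [ih rest (c :: cur) acc (by simpa using Nat.lt_of_succ_lt_succ h)]
        simp [splitRec, hc]

lemma splitOn_eq_splitRec (cs : List Char) : PySem.Chars.splitOn cs [' '] = splitRec [] cs := by
  unfold PySem.Chars.splitOn
  rw [splitOn_go_eq (cs.length + 1) cs [] [] (by omega)]
  simp

-- the rendered answer for remaining text `t` with pending (unfinished) word `p`
def render (p t : List Char) : List Char :=
  PySem.Chars.join [' '] ((splitRec p t).map (fun w => PySem.Int.toChars (w.length : Int)))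

lemma render_space (p u : List Char) :
    render p (' ' :: u) = PySem.Int.toChars (p.length : Int) ++ [' '] ++ render [] u := by
  unfold render
  rw [show splitRec p (' ' :: u) = p :: splitRec [] u by simp [splitRec]]
  obtain ⟨b, t, hbt⟩ : ∃ b t, splitRec [] u = b :: t := by
    cases h : splitRec [] u with
    | nil => exact absurd h (splitRec_ne_nil [] u)
    | cons b t => exact ⟨b, t, rfl⟩
  rw [hbt]
  simp [PySem.Chars.join_cons_cons]

-- A's loop from index k onward, with prev_pos = p and a pending word of length k - p,
-- appends exactly the rendering of the remaining text.
-- evaluations of one loop step of A under the four branch combinations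
lemma stepA_space (cs r : List Char) (pv i : Int) (hc : PySem.List.pyGetD cs i ' ' = ' ')
    (hl : i ≠ (cs.length : Int) - 1) :
    convertStepA cs (r, pv) i = (r ++ PySem.Int.toChars (i - pv) ++ [' '], i + 1) := by
  simp [convertStepA, hc, hl]

lemma stepA_space_last (cs r : List Char) (pv i : Int) (hc : PySem.List.pyGetD cs i ' ' = ' ')
    (hl : i = (cs.length : Int) - 1) :
    convertStepA cs (r, pv) i
      = (r ++ PySem.Int.toChars (i - pv) ++ [' '] ++ PySem.Int.toChars 0, i + 1) := by
  subst hl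
  simp [convertStepA, hc]

lemma stepA_char (cs r : List Char) (pv i : Int) (hc : ¬ PySem.List.pyGetD cs i ' ' = ' ')
    (hl : i ≠ (cs.length : Int) - 1) :
    convertStepA cs (r, pv) i = (r, pv) := by
  simp [convertStepA, hc, hl]

lemma stepA_char_last (cs r : List Char) (pv i : Int) (hc : ¬ PySem.List.pyGetD cs i ' ' = ' ')
    (hl : i = (cs.length : Int) - 1) :
    convertStepA cs (r, pv) i = (r ++ PySem.Int.toChars (i - pv + 1), pv) := by
  subst hl
  simp [convertStepA, hc]

lemma loopA (cs : List Char) : ∀ (m k p : Nat) (pend ret : List Char),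
    m = cs.length - k → k < cs.length → p + pend.length = k →
    ((PySem.List.pyRange (k : Int) (cs.length : Int) 1).foldl (convertStepA cs)
        (ret, (p : Int))).1
      = ret ++ render pend (cs.drop k) := by
  intro m
  induction m with
  | zero => intro k p pend ret hm hk _; omega
  | succ m ih =>
    intro k p pend ret hm hk hp
    rw [PySem.List.pyRange_one_cons (by exact_mod_cast hk)]
    simp only [List.foldl_cons]
    have hget : PySem.List.pyGetD cs (k : Int) ' ' = cs[k]?.getD ' ' := by
      rw [PySem.List.pyGetD_natCast, List.getD_eq_getElem?_getD]
    have hdrop : cs.drop k = cs[k]?.getD ' ' :: cs.drop (k + 1) := by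
      rw [List.getElem?_eq_getElem hk]
      exact (List.getElem_cons_drop hk).symm
    by_cases hlast : k + 1 = cs.length
    · have hrange : PySem.List.pyRange ((k : Int) + 1) (cs.length : Int) 1 = [] := by
        simp [PySem.List.pyRange, show ((k : Int) + 1) = (cs.length : Int) by omega]
      have hdrop1 : cs.drop (k + 1) = [] := by simp [hlast]
      rw [hrange]
      simp only [List.foldl_nil]
      have htrue : ((k : Int) = (cs.length : Int) - 1) := by omega
      by_cases hc : cs[k]?.getD ' ' = ' '
      · rw [stepA_space_last cs ret (p : Int) (k : Int) (by rw [hget]; exact hc) htrue]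
        rw [hdrop, hc, render_space, hdrop1]
        have h0 : ((k : Int) - (p : Int)) = (pend.length : Int) := by omega
        rw [h0]
        simp [render, splitRec, PySem.Chars.join_singleton]
      · rw [stepA_char_last cs ret (p : Int) (k : Int) (by rw [hget]; exact hc) htrue]
        rw [hdrop, hdrop1]
        have h1 : ((k : Int) - (p : Int) + 1) = ((pend.length + 1 : Nat) : Int) := by
          push_cast; omega
        rw [h1]
        simp [render, splitRec, hc, PySem.Chars.join_singleton]
    · have hk1 : k + 1 < cs.length := by omega
      have hfalse : ¬ ((k : Int) = (cs.length : Int) - 1) := by omega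
      by_cases hc : cs[k]?.getD ' ' = ' '
      · rw [stepA_space cs ret (p : Int) (k : Int) (by rw [hget]; exact hc) hfalse]
        rw [show ((k : Int) + 1) = ((k + 1 : Nat) : Int) by push_cast; ring]
        rw [ih (k + 1) (k + 1) [] _ (by omega) hk1 (by simp)]
        rw [hdrop, hc, render_space]
        have h0 : ((k : Int) - (p : Int)) = (pend.length : Int) := by omega
        rw [h0]
        simp
      · rw [stepA_char cs ret (p : Int) (k : Int) (by rw [hget]; exact hc) hfalse]
        rw [show ((k : Int) + 1) = ((k + 1 : Nat) : Int) by push_cast; ring]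
        rw [ih (k + 1) p (pend ++ [cs[k]?.getD ' ']) _ (by omega) hk1 (by simp; omega)]
        rw [hdrop]
        simp [render, splitRec, hc]

-- ===== VERDICT (by name: the statement is the Claim_ definition above) =====
theorem convert_words_spec : Claim_equal_convert_words := by
  intro s _
  unfold Spec_convert_words convert_words convert_words_alt
  by_cases hs : s = ""
  · subst hs; rfl
  · rw [if_neg hs]
    have hne : s.toList ≠ [] := by
      intro h
      apply hs
      have h2 := congrArg String.ofList h
      rwa [String.ofList_toList] at h2
    have hlen : 0 < s.toList.length := List.length_pos_iff.mpr hne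
    show String.ofList _ = _
    congr 1
    have := loopA s.toList (s.toList.length) 0 0 [] [] (by omega) hlen (by simp)
    simp only [Nat.cast_zero] at this
    rw [this]
    rw [splitOn_eq_splitRec]
    simp [render]
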